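-- pv_equiv track=rewrite | github.com/DevStarSJ/algorithmExercise | code/LongestQuasiconstSubseq.py | LongestQuasiconstSubseq
-- ===== SOURCE A (Python) =====
-- def LongestQuasiconstSubseq(seq):
--
--     uniqueSeq = sorted(list(set(seq)))
--
--     cnt = len(uniqueSeq)
--
--     maxQuasi = 0
--
--     for i, v in enumerate(uniqueSeq):
--         for j in range(i,cnt):
--             w = uniqueSeq[j]
--             if abs(w - v) <= 1:
--                 maxQuasi = max(maxQuasi,len([ e for e in seq if v <= e <= w ]))
--             else:
--                 break
--
--     return maxQuasi
-- ===== SOURCE B (Python) =====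
-- def LongestQuasiconstSubseq(seq):
--     cnt = {}
--     for e in seq:
--         cnt[e] = cnt.get(e, 0) + 1
--     best = 0
--     for v, c in cnt.items():
--         best = max(best, c + cnt.get(v + 1, 0))
--     return best
-- ===== Notes on version B (the rewrite author's own statement) =====
-- stated objective: faster
-- what changed: Replaces A's sort of the unique values plus a quadratic pair scan that recounts the window with a list comprehension each time by one hash-counter pass and one pass over its entries taking max of cnt[v]+cnt[v+1].
import Mathlib
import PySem

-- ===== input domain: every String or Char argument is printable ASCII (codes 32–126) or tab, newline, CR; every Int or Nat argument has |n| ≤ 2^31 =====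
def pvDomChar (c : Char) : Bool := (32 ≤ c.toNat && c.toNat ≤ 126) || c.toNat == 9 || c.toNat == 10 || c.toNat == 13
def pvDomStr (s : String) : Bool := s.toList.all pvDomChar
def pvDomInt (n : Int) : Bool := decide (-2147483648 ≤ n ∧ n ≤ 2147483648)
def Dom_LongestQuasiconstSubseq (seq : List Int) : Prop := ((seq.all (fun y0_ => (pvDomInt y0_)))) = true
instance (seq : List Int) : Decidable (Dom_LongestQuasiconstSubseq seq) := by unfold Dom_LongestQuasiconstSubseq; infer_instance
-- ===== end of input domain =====

-- B replaces A's sort + quadratic scan over unique-value pairs (recounting the window each time)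
-- by a single counting pass and one pass over the counter summing cnt[v]+cnt[v+1]  (objective: faster).

-- ===== PORT A =====
-- inner loop 'for j in range(i, cnt): w = uniqueSeq[j]; if abs(w-v) <= 1: ... else: break'
-- (every j passed in is a valid index into u, so the .getD 0 of pyGet? is never taken)
def pvInnerA (seq u : List Int) (v : Int) : List Int → Int → Int
  | [], acc => acc
  | j :: js, acc =>
    let w := (PySem.List.pyGet? u j).getD 0
    if |w - v| ≤ 1 then
      pvInnerA seq u v js
        (max acc ((List.countP (fun e => decide (v ≤ e) && decide (e ≤ w)) seq : Nat) : Int))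
    else acc

def LongestQuasiconstSubseq (seq : List Int) : Int :=
  let uniqueSeq := PySem.List.sorted (PySem.Set.ofList seq) id
  let cnt := uniqueSeq.length
  (PySem.List.enumerate uniqueSeq).foldl
    (fun maxQuasi p => pvInnerA seq uniqueSeq p.2 (PySem.List.pyRange p.1 (cnt : Int)) maxQuasi) 0

-- ===== PORT B =====
def LongestQuasiconstSubseq_alt (seq : List Int) : Int :=
  let cnt := seq.foldl (fun d e => d.modify e 0 (· + 1)) (PySem.Dict.empty : PySem.Dict Int Int)
  cnt.items.foldl (fun best p => max best (p.2 + cnt.getD (p.1 + 1) 0)) 0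

-- ===== PRECONDITION & SPEC =====
def Spec_LongestQuasiconstSubseq (seq : List Int) (out : Int) : Prop := out = LongestQuasiconstSubseq_alt seq
instance (seq : List Int) (out : Int) : Decidable (Spec_LongestQuasiconstSubseq seq out) := by unfold Spec_LongestQuasiconstSubseq; infer_instance

-- ===== CLAIM (what is proved, stated in full; the proofs are below) =====
def Claim_equal_LongestQuasiconstSubseq : Prop := ∀ (seq : List Int), Dom_LongestQuasiconstSubseq seq → Spec_LongestQuasiconstSubseq seq (LongestQuasiconstSubseq seq)

-- ===== LEMMAS AND PROOFS =====

-- the common value both sides take max of, per present value v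
def pvG (seq : List Int) (v : Int) : Int := (seq.count v : Int) + (seq.count (v + 1) : Int)

-- the window count A computes
def pvW (seq : List Int) (v w : Int) : Int :=
  ((List.countP (fun e => decide (v ≤ e) && decide (e ≤ w)) seq : Nat) : Int)

lemma pvCountP_window (seq : List Int) (v : Int) :
    List.countP (fun e => decide (v ≤ e) && decide (e ≤ v + 1)) seq
      = seq.count v + seq.count (v + 1) := by
  induction seq with
  | nil => simp
  | cons a l ih =>
    simp only [List.countP_cons, List.count_cons, Bool.and_eq_true, decide_eq_true_eq,
      beq_iff_eq]
    split_ifs <;> omega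

lemma pvW_window (seq : List Int) (v : Int) : pvW seq v (v + 1) = pvG seq v := by
  unfold pvW pvG
  rw [pvCountP_window]
  push_cast
  ring

lemma pvW_single (seq : List Int) (v : Int) (h : v + 1 ∉ seq) : pvW seq v v = pvG seq v := by
  unfold pvW pvG
  have h0 : seq.count (v + 1) = 0 := List.count_eq_zero.mpr h
  have h1 : List.countP (fun e => decide (v ≤ e) && decide (e ≤ v)) seq
      = List.countP (fun e => decide (v ≤ e) && decide (e ≤ v + 1)) seq := by
    refine List.countP_congr (fun x hx => ?_)
    have hxne : x ≠ v + 1 := fun hc => h (hc ▸ hx)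
    simp only [Bool.and_eq_true, decide_eq_true_eq]
    omega
  rw [h1, pvCountP_window, h0]
  push_cast
  ring

lemma pvW_mono (seq : List Int) (v : Int) : pvW seq v v ≤ pvW seq v (v + 1) := by
  unfold pvW
  have := List.countP_mono_left (l := seq)
    (p := fun e => decide (v ≤ e) && decide (e ≤ v))
    (q := fun e => decide (v ≤ e) && decide (e ≤ v + 1))
    (fun x _ hx => by simp only [Bool.and_eq_true, decide_eq_true_eq] at *; omega)
  exact_mod_cast this

-- the inner loop, started at a valid index i, produces max acc (pvG seq u[i])
lemma pvInnerA_eq (seq u : List Int) (hpw : List.Pairwise (· < ·) u)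
    (hmem : ∀ x, x ∈ u ↔ x ∈ seq) (i : Nat) (hi : i < u.length) (acc : Int) :
    pvInnerA seq u u[i] (PySem.List.pyRange (i : Int) (u.length : Int)) acc
      = max acc (pvG seq u[i]) := by
  have hget : ∀ (k : Nat) (hk : k < u.length),
      (PySem.List.pyGet? u (k : Int)).getD 0 = u[k] := by
    intro k hk
    rw [PySem.List.pyGet?_natCast, List.getElem?_eq_getElem hk]
    rfl
  have hlt : ∀ (a b : Nat) (_ : a < b) (hb : b < u.length), u[a] < u[b] := by
    intro a b hab hb
    exact List.pairwise_iff_getElem.mp hpw a b (lt_trans hab hb) hb hab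
  rw [PySem.List.pyRange_one_cons (by exact_mod_cast hi)]
  rw [show ((i : Int) + 1) = ((i + 1 : Nat) : Int) by push_cast; ring]
  simp only [pvInnerA, hget i hi]
  rw [if_pos (by simp)]
  by_cases hnext : i + 1 < u.length
  · rw [PySem.List.pyRange_one_cons (by exact_mod_cast hnext)]
    rw [show (((i + 1 : Nat) : Int) + 1) = ((i + 2 : Nat) : Int) by push_cast; ring]
    simp only [pvInnerA, hget (i + 1) hnext]
    have hgt : u[i] < u[i + 1] := hlt i (i + 1) (by omega) hnext
    by_cases hadj : u[i + 1] = u[i] + 1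
    · rw [if_pos (by rw [hadj]; simp)]
      have htail : pvInnerA seq u u[i]
          (PySem.List.pyRange ((i + 2 : Nat) : Int) (u.length : Int))
          (max (max acc (pvW seq u[i] u[i])) (pvW seq u[i] u[i + 1]))
          = max (max acc (pvW seq u[i] u[i])) (pvW seq u[i] u[i + 1]) := by
        by_cases h2 : i + 2 < u.length
        · rw [PySem.List.pyRange_one_cons (by exact_mod_cast h2)]
          simp only [pvInnerA, hget (i + 2) h2]
          rw [if_neg]
          have h3 : u[i + 1] < u[i + 2] := hlt (i + 1) (i + 2) (by omega) h2
          rw [abs_le]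
          omega
        · rw [PySem.List.pyRange_one_eq_nil (by exact_mod_cast (by omega : u.length ≤ i + 2))]
          rfl
      show pvInnerA seq u u[i] _ (max (max acc (pvW seq u[i] u[i])) (pvW seq u[i] u[i + 1])) = _
      rw [htail, hadj, pvW_window, max_right_comm]
      have hle : pvW seq u[i] u[i] ≤ pvG seq u[i] := by
        rw [← pvW_window]; exact pvW_mono seq u[i]
      rw [max_eq_left (le_trans hle (le_max_right _ _))]
    · have hnotmem : u[i] + 1 ∉ seq := by
        intro hc
        rw [← hmem] at hc
        obtain ⟨k, hk, hke⟩ := List.mem_iff_getElem.mp hc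
        have hik : i < k := by
          rcases lt_trichotomy k i with h | h | h
          · have := hlt k i h hi; omega
          · subst h; omega
          · exact h
        rcases Nat.lt_or_ge (i + 1) k with h | h
        · have := hlt (i + 1) k h hk; omega
        · have hk1 : k = i + 1 := by omega
          subst hk1; omega
      rw [if_neg (by rw [abs_le]; omega)]
      show max acc (pvW seq u[i] u[i]) = _
      rw [pvW_single seq u[i] hnotmem]
  · rw [PySem.List.pyRange_one_eq_nil (by exact_mod_cast (by omega : u.length ≤ i + 1))]
    show max acc (pvW seq u[i] u[i]) = _
    have hnotmem : u[i] + 1 ∉ seq := by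
      intro hc
      rw [← hmem] at hc
      obtain ⟨k, hk, hke⟩ := List.mem_iff_getElem.mp hc
      rcases lt_trichotomy k i with h | h | h
      · have := hlt k i h hi; omega
      · subst h; omega
      · omega
    rw [pvW_single seq u[i] hnotmem]

-- A computes the fold of max (pvG) over the sorted distinct values
lemma pvA_eq (seq : List Int) :
    LongestQuasiconstSubseq seq
      = (PySem.List.sorted (PySem.Set.ofList seq) id).foldl
          (fun a v => max a (pvG seq v)) 0 := by
  unfold LongestQuasiconstSubseq
  set u := PySem.List.sorted (PySem.Set.ofList seq) id with hu
  have hperm : u.Perm (PySem.Set.ofList seq) := PySem.List.sorted_perm _ _ _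
  have hnd : u.Nodup := hperm.nodup_iff.mpr (PySem.Set.nodup_ofList seq)
  have hle : List.Pairwise (· ≤ ·) u := by
    have := PySem.List.sorted_pairwise (PySem.Set.ofList seq) (id : Int → Int)
    simpa using this
  have hpw : List.Pairwise (· < ·) u := by
    rw [List.pairwise_iff_getElem] at hle ⊢
    intro a b ha hb hab
    have h1 := hle a b ha hb hab
    have h2 : u[a] ≠ u[b] := by
      intro hc
      exact absurd (List.Nodup.getElem_inj_iff hnd |>.mp hc) (by omega)
    omega
  have hmem : ∀ x, x ∈ u ↔ x ∈ seq := by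
    intro x
    rw [hperm.mem_iff, PySem.Set.mem_ofList]
  calc (PySem.List.enumerate u).foldl
        (fun maxQuasi p => pvInnerA seq u p.2 (PySem.List.pyRange p.1 (u.length : Int)) maxQuasi) 0
      = (PySem.List.enumerate u).foldl (fun a p => max a (pvG seq p.2)) 0 := by
        apply PySem.List.foldl_congr_mem
        intro acc p hp
        obtain ⟨k, hk, hpe⟩ := (PySem.List.mem_enumerate_iff u 0 p).mp hp
        rw [hpe]
        simpa using pvInnerA_eq seq u hpw hmem k hk acc
    _ = ((PySem.List.enumerate u).map (fun p => p.2)).foldl (fun a v => max a (pvG seq v)) 0 := by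
        rw [List.foldl_map]
    _ = u.foldl (fun a v => max a (pvG seq v)) 0 := by
        rw [PySem.List.map_snd_enumerate]

-- B computes the fold of max (pvG) over the first-occurrence distinct values
lemma pvB_eq (seq : List Int) :
    LongestQuasiconstSubseq_alt seq
      = (PySem.Set.ofList seq).foldl (fun a v => max a (pvG seq v)) 0 := by
  show ((PySem.Dict.counter seq).items.foldl
      (fun best p => max best (p.2 + (PySem.Dict.counter seq).getD (p.1 + 1) 0)) 0) = _
  rw [PySem.Dict.items_counter, List.foldl_map]
  apply PySem.List.foldl_congr_mem
  intro acc x _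
  rw [PySem.Dict.getD_counter]
  rfl

-- ===== VERDICT (by name: the statement is the Claim_ definition above) =====
theorem LongestQuasiconstSubseq_spec : Claim_equal_LongestQuasiconstSubseq := by
  intro seq _
  show LongestQuasiconstSubseq seq = LongestQuasiconstSubseq_alt seq
  rw [pvA_eq, pvB_eq]
  exact @List.Perm.foldl_eq _ _ (fun a v => max a (pvG seq v)) _ _
    ⟨fun a b₁ b₂ => by simp [max_right_comm]⟩ (PySem.List.sorted_perm _ _ _) 0
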